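-- pv_equiv track=rewrite | github.com/yenchuroman-max/campusplus | scripts/seed_showcase_data.py | _build_student_tiers
-- ===== SOURCE A (Python) =====
-- def _build_student_tiers(student_ids: list[int]) -> dict[int, str]:
--     tiers: dict[int, str] = {}
--     for idx, student_id in enumerate(student_ids):
--         if idx < 3:
--             tiers[student_id] = "perfect"
--         elif idx < 7:
--             tiers[student_id] = "mixed"
--         else:
--             tiers[student_id] = "weak"
--     return tiers
-- ===== SOURCE B (Python) =====
-- def _build_student_tiers(student_ids: list[int]) -> dict[int, str]:
--     tiers: dict[int, str] = {}
--     for student_id in student_ids[:3]: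
--         tiers[student_id] = "perfect"
--     for student_id in student_ids[3:7]:
--         tiers[student_id] = "mixed"
--     for student_id in student_ids[7:]:
--         tiers[student_id] = "weak"
--     return tiers
-- ===== Notes on version B (the rewrite author's own statement) =====
-- stated objective: simpler
-- what changed: Replaces the single enumerate loop with per-element if/elif/else branching by three branch-free passes over the index slices [:3], [3:7], [7:], each writing one constant tier label; ascending slice order preserves last-write-wins for duplicate ids.
import Mathlib
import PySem

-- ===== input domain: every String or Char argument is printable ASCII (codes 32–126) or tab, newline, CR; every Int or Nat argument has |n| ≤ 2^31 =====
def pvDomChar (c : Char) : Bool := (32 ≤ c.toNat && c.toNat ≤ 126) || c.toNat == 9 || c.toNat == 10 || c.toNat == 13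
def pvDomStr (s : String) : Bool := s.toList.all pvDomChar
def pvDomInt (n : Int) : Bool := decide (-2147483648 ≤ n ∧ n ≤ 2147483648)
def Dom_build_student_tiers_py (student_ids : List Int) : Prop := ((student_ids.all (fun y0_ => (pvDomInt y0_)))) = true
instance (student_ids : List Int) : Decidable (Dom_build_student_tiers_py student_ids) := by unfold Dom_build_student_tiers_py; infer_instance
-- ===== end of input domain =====

-- B assigns the same tiers via three branch-free passes over the index slices [:3], [3:7], [7:]
-- instead of A's per-element if/elif/else inside one enumerate loop (objective: simpler decomposition).

-- ===== PORT A =====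
def build_student_tiers_py (student_ids : List Int) : List (Int × String) :=
  ((PySem.List.enumerate student_ids 0).foldl
    (fun tiers p =>
      if p.1 < 3 then tiers.insert p.2 "perfect"
      else if p.1 < 7 then tiers.insert p.2 "mixed"
      else tiers.insert p.2 "weak")
    PySem.Dict.empty).items

-- ===== PORT B =====
def build_student_tiers_py_alt (student_ids : List Int) : List (Int × String) :=
  let t1 := (PySem.List.slice student_ids none (some 3)).foldl
      (fun tiers s => tiers.insert s "perfect") PySem.Dict.empty
  let t2 := (PySem.List.slice student_ids (some 3) (some 7)).foldl
      (fun tiers s => tiers.insert s "mixed") t1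
  let t3 := (PySem.List.slice student_ids (some 7) none).foldl
      (fun tiers s => tiers.insert s "weak") t2
  t3.items

-- ===== PRECONDITION & SPEC =====
def Spec_build_student_tiers_py (student_ids : List Int) (out : List (Int × String)) : Prop := out = build_student_tiers_py_alt student_ids
instance (student_ids : List Int) (out : List (Int × String)) : Decidable (Spec_build_student_tiers_py student_ids out) := by unfold Spec_build_student_tiers_py; infer_instance

-- ===== CLAIM (what is proved, stated in full; the proofs are below) =====
def Claim_equal_build_student_tiers_py : Prop := ∀ (student_ids : List Int), Dom_build_student_tiers_py student_ids → Spec_build_student_tiers_py student_ids (build_student_tiers_py student_ids)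

-- ===== LEMMAS AND PROOFS =====

-- A's loop over an enumerate segment whose indices all select the same label is B's constant-label pass.
theorem fold_enum_const (xs : List Int) (s : Int) (d : PySem.Dict Int String) (lab : String)
    (h : ∀ k : Nat, k < xs.length →
      (if s + (k : Int) < 3 then "perfect" else if s + (k : Int) < 7 then "mixed" else "weak") = lab) :
    (PySem.List.enumerate xs s).foldl
      (fun tiers p =>
        if p.1 < 3 then tiers.insert p.2 "perfect"
        else if p.1 < 7 then tiers.insert p.2 "mixed"
        else tiers.insert p.2 "weak") d
    = xs.foldl (fun tiers x => tiers.insert x lab) d := by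
  induction xs generalizing s d with
  | nil => simp [PySem.List.enumerate_nil]
  | cons x xs ih =>
    rw [PySem.List.enumerate_cons]
    have h0 := h 0 (by simp)
    simp only [Int.natCast_zero, Int.add_zero] at h0
    simp only [List.foldl_cons]
    have hstep : (if s < 3 then d.insert x "perfect"
        else if s < 7 then d.insert x "mixed" else d.insert x "weak") = d.insert x lab := by
      split_ifs at h0 ⊢ <;> rw [h0]
    rw [hstep]
    exact ih (s + 1) _ (fun k hk => by
      have := h (k + 1) (by simpa using Nat.succ_lt_succ hk)
      simpa [add_assoc, add_comm (1 : Int)] using this)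

-- ===== VERDICT (by name: the statement is the Claim_ definition above) =====
theorem build_student_tiers_py_spec : Claim_equal_build_student_tiers_py := by
  intro ids _
  unfold Spec_build_student_tiers_py build_student_tiers_py build_student_tiers_py_alt
  dsimp only
  rw [PySem.List.slice_to ids (by norm_num), PySem.List.slice_toNat ids (by norm_num) (by norm_num),
    PySem.List.slice_from ids (by norm_num)]
  have hta : (ids.take 3).length = min 3 ids.length := List.length_take ..
  have htb : ((ids.drop 3).take 4).length = min 4 (ids.length - 3) := by
    simp [List.length_take]
  have hids : ids = ids.take 3 ++ ((ids.drop 3).take 4 ++ ids.drop 7) := by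
    rw [show ids.drop 7 = (ids.drop 3).drop 4 from by simp [List.drop_drop],
      List.take_append_drop, List.take_append_drop]
  have hA : ∀ k : Nat, k < (ids.take 3).length →
      (if (0:Int) + (k : Int) < 3 then "perfect" else if (0:Int) + (k : Int) < 7 then "mixed" else "weak") = "perfect" := by
    intro k hk
    rw [hta] at hk
    rw [if_pos (by omega)]
  have hB : ∀ k : Nat, k < ((ids.drop 3).take 4).length →
      (if ((0:Int) + ((ids.take 3).length : Int)) + (k : Int) < 3 then "perfect"
       else if ((0:Int) + ((ids.take 3).length : Int)) + (k : Int) < 7 then "mixed" else "weak") = "mixed" := by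
    intro k hk
    rw [htb] at hk
    have h3 : (ids.take 3).length = 3 := by omega
    rw [h3, if_neg (by omega), if_pos (by omega)]
  have hC : ∀ k : Nat, k < (ids.drop 7).length →
      (if ((0:Int) + ((ids.take 3).length : Int) + (((ids.drop 3).take 4).length : Int)) + (k : Int) < 3 then "perfect"
       else if ((0:Int) + ((ids.take 3).length : Int) + (((ids.drop 3).take 4).length : Int)) + (k : Int) < 7 then "mixed" else "weak") = "weak" := by
    intro k hk
    have hlen : 7 < ids.length := by
      simp [List.length_drop] at hk; omega
    have h3 : (ids.take 3).length = 3 := by omega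
    have h4 : (((ids.drop 3).take 4)).length = 4 := by omega
    rw [h3, h4, if_neg (by omega), if_neg (by omega)]
  conv_lhs => rw [hids]
  rw [PySem.List.enumerate_append, PySem.List.enumerate_append,
    List.foldl_append, List.foldl_append,
    fold_enum_const _ _ _ "perfect" hA,
    fold_enum_const _ _ _ "mixed" hB,
    fold_enum_const _ _ _ "weak" hC]
  simp
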